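-- pv_equiv track=rewrite | github.com/kwon243/epic | make_groups.py | preference_penalty
-- ===== SOURCE A (Python) =====
-- from typing import Dict, List, Optional, Tuple
--
-- def preference_penalty(group: List[str], pref: Dict[str, str]) -> int:
--     # Soft penalty: 0 if satisfied or no preference, 2 if violated.
--     # You can tune these if you want preferences stricter/looser.
--     size = len(group)
--     pen = 0
--     for p in group:
--         want = pref.get(p, "N")
--         if want == "N":
--             continue
--         if want == "2" and size != 2:
--             pen += 2
--         if want == "3" and size != 3:
--             pen += 2
--     return pen
-- ===== SOURCE B (Python) =====
-- def preference_penalty(group, pref):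
--     # Inverted traversal: tally the group members once, then charge each pref
--     # entry 2 * (occurrences of that person) when its wish conflicts with size.
--     tally = {}
--     for p in group:
--         tally[p] = tally.get(p, 0) + 1
--     size = len(group)
--     pen = 0
--     for person, want in pref.items():
--         if (want == "2" and size != 2) or (want == "3" and size != 3):
--             pen += 2 * tally.get(person, 0)
--     return pen
-- ===== Notes on version B (the rewrite author's own statement) =====
-- stated objective: alternative
-- what changed: B inverts the traversal: instead of looking up each group member in pref, it builds a multiplicity tally of the group once and then iterates over the pref entries, charging each conflicting wish 2 times the member's multiplicity.
import Mathlib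
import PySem

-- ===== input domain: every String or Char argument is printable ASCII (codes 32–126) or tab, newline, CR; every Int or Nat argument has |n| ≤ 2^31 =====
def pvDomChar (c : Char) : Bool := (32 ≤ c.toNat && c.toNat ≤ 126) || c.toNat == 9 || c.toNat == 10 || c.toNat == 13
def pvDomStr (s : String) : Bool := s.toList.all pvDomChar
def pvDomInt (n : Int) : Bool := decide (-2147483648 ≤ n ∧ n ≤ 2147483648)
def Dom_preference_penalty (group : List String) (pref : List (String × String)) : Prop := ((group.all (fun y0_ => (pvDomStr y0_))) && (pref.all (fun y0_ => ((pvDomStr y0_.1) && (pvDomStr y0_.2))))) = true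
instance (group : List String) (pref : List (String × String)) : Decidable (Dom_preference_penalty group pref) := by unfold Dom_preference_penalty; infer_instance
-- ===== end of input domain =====

-- B inverts the traversal: it tallies the group's members once and then walks the
-- pref entries, charging 2 × multiplicity per conflicting wish (objective: alternative).


-- pref.get(p, "N") — first-match association-list lookup (A's per-member lookup)
def prefGet (pref : List (String × String)) (p : String) : String :=
  match pref.find? (fun kv => kv.1 == p) with
  | some kv => kv.2
  | none => "N"

-- ===== PORT A =====
def preference_penalty (group : List String) (pref : List (String × String)) : Int :=
  let size := group.length
  group.foldl (fun pen p =>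
    let want := prefGet pref p
    if want = "N" then pen
    else
      let pen := if want = "2" ∧ size ≠ 2 then pen + 2 else pen
      let pen := if want = "3" ∧ size ≠ 3 then pen + 2 else pen
      pen) 0

-- ===== PORT B =====
def preference_penalty_alt (group : List String) (pref : List (String × String)) : Int :=
  let tally := group.foldl (fun d p => d.insert p (d.getD p 0 + 1)) (PySem.Dict.empty : PySem.Dict String Int)
  let size := group.length
  pref.foldl (fun pen kv =>
    if (kv.2 = "2" ∧ size ≠ 2) ∨ (kv.2 = "3" ∧ size ≠ 3) then pen + 2 * tally.getD kv.1 0 else pen) 0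

-- ===== PRECONDITION & SPEC =====
-- Pre_ restricts pref to association lists with pairwise-distinct keys — the ones that
-- faithfully represent a Python dict; on duplicate keys first-match vs last-write-wins
-- is an artefact of the representation and either reading is defensible.
def Pre_preference_penalty (group : List String) (pref : List (String × String)) : Prop :=
  (pref.map Prod.fst).Nodup
instance (group : List String) (pref : List (String × String)) : Decidable (Pre_preference_penalty group pref) := by unfold Pre_preference_penalty; infer_instance

def pvWitness_preference_penalty : List String × (List (String × String)) :=
  (["ann", "bob", "cal"], [("ann", "2"), ("bob", "N"), ("dee", "3")])

def Spec_preference_penalty (group : List String) (pref : List (String × String)) (out : Int) : Prop := out = preference_penalty_alt group pref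
instance (group : List String) (pref : List (String × String)) (out : Int) : Decidable (Spec_preference_penalty group pref out) := by unfold Spec_preference_penalty; infer_instance

-- ===== CLAIM (what is proved, stated in full; the proofs are below) =====
def Claim_equal_preference_penalty : Prop := ∀ (group : List String) (pref : List (String × String)), Dom_preference_penalty group pref → Pre_preference_penalty group pref → Spec_preference_penalty group pref (preference_penalty group pref)

-- ===== LEMMAS AND PROOFS =====

-- per-member charge, as one closed-form term
def charge (size : Nat) (w : String) : Int :=
  if (w = "2" ∧ size ≠ 2) ∨ (w = "3" ∧ size ≠ 3) then 2 else 0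

-- A's fold equals the sum of per-member charges
theorem a_fold_eq_sum (size : Nat) (pref : List (String × String)) :
    ∀ (l : List String) (pen : Int),
      l.foldl (fun pen p =>
        let want := prefGet pref p
        if want = "N" then pen
        else
          let pen := if want = "2" ∧ size ≠ 2 then pen + 2 else pen
          let pen := if want = "3" ∧ size ≠ 3 then pen + 2 else pen
          pen) pen
      = pen + (l.map (fun p => charge size (prefGet pref p))).sum := by
  intro l
  induction l with
  | nil => intro pen; simp
  | cons p t ih =>
    intro pen
    simp only [List.foldl_cons, List.map_cons, List.sum_cons]
    rw [ih]
    unfold charge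
    by_cases h2 : prefGet pref p = "2" <;> by_cases h3 : prefGet pref p = "3" <;>
      by_cases hN : prefGet pref p = "N" <;> simp_all <;> split_ifs <;> simp_all <;> ring

-- B's fold equals the sum over pref of charge × multiplicity
theorem b_fold_eq_sum (size : Nat) (group : List String) :
    ∀ (pref : List (String × String)) (pen : Int),
      pref.foldl (fun pen kv =>
        if (kv.2 = "2" ∧ size ≠ 2) ∨ (kv.2 = "3" ∧ size ≠ 3) then
          pen + 2 * ((PySem.Dict.counter group).getD kv.1 0) else pen) pen
      = pen + (pref.map (fun kv => charge size kv.2 * (group.count kv.1 : Int))).sum := by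
  intro pref
  induction pref with
  | nil => intro pen; simp
  | cons kv t ih =>
    intro pen
    simp only [List.foldl_cons, List.map_cons, List.sum_cons]
    rw [ih, PySem.Dict.getD_counter]
    unfold charge
    split_ifs <;> ring

-- the two sums agree when pref's keys are distinct
theorem sums_eq (size : Nat) :
    ∀ (pref : List (String × String)), (pref.map Prod.fst).Nodup →
      ∀ (group : List String),
        (group.map (fun p => charge size (prefGet pref p))).sum
          = (pref.map (fun kv => charge size kv.2 * (group.count kv.1 : Int))).sum := by
  intro pref
  induction pref with
  | nil =>
    intro _ group
    simp [prefGet, charge]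
  | cons kv t ih =>
    intro hnd group
    simp only [List.map_cons, List.nodup_cons] at hnd
    obtain ⟨hk, hndt⟩ := hnd
    have hget : ∀ p, prefGet (kv :: t) p = if p = kv.1 then kv.2 else prefGet t p := by
      intro p
      unfold prefGet
      rw [List.find?_cons]
      by_cases h : p = kv.1
      · subst h
        simp
      · have : (kv.1 == p) = false := by simp; exact fun e => h e.symm
        simp [this, h]
    have hkN : prefGet t kv.1 = "N" := by
      unfold prefGet
      cases hfind : t.find? (fun kv' => kv'.1 == kv.1) with
      | none => rfl
      | some kv' =>
        exfalso
        have hmem := List.find?_some hfind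
        have hmem' := List.mem_of_find?_eq_some hfind
        simp at hmem
        have : kv'.1 ∈ t.map Prod.fst := List.mem_map_of_mem hmem'
        rw [hmem] at this
        exact hk this
    have hchargeN : charge size "N" = 0 := by simp [charge]
    simp only [List.map_cons, List.sum_cons]
    rw [← ih hndt group]
    -- Σ_group charge(get (kv::t) p) = charge kv.2 * count kv.1 group + Σ_group charge(get t p)
    induction group with
    | nil => simp
    | cons g gs ihg =>
      simp only [List.map_cons, List.sum_cons]
      rw [hget g, ihg]
      by_cases hg : g = kv.1
      · subst hg
        have hc : (kv.1 :: gs).count kv.1 = gs.count kv.1 + 1 := by simp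
        rw [if_pos rfl, hc, hkN, hchargeN]
        push_cast
        ring
      · have hc : (g :: gs).count kv.1 = gs.count kv.1 := by
          simp [List.count_cons]; exact fun e => hg e
        rw [if_neg hg, hc]
        ring

-- ===== VERDICT (by name: the statement is the Claim_ definition above) =====
theorem preference_penalty_spec : Claim_equal_preference_penalty := by
  intro group pref _ hpre
  unfold Spec_preference_penalty preference_penalty preference_penalty_alt
  rw [a_fold_eq_sum, PySem.Dict.foldl_insert_getD_add_one_eq_counter, b_fold_eq_sum,
    sums_eq group.length pref hpre group]
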